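-- pv_equiv track=rewrite | github.com/willian3reis/web-devveloper-test-olist | resource/service_call_record.py | count
-- ===== SOURCE A (Python) =====
-- def count(dt_weights):
--     lista = []
--     contador=0
--     n=0
--     for i in dt_weights:
--         if i == 1:
--             #print i
--             ini_conta = True
--             n=n+1
--         else:
--             ini_conta = False
--             if contador!= 0:
--                 lista.append({n:contador})
--             contador = 0
--             #print i
--
--         if ini_conta:
--             contador = contador + 1
--
--     if contador!= 0:
--         lista.append({n:contador})
--
--     return lista
-- ===== SOURCE B (Python) =====
-- def _runs(xs):
--     # run-length encoding: list of (value, run_length) for consecutive equal values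
--     if not xs:
--         return []
--     out = []
--     k, c = xs[0], 1
--     for x in xs[1:]:
--         if x == k:
--             c += 1
--         else:
--             out.append((k, c))
--             k, c = x, 1
--     out.append((k, c))
--     return out
--
-- def count(dt_weights):
--     n = 0
--     lista = []
--     for k, L in _runs(dt_weights):
--         if k == 1:
--             n += L
--             lista.append({n: L})
--     return lista
-- ===== Notes on version B (the rewrite author's own statement) =====
-- stated objective: alternative
-- what changed: B first run-length-encodes the whole list into (value, length) pairs and then folds over the runs, keeping only a cumulative ones-counter, instead of A's single pass with a run-in-progress counter, flag and end-of-run flush.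
import Mathlib
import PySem

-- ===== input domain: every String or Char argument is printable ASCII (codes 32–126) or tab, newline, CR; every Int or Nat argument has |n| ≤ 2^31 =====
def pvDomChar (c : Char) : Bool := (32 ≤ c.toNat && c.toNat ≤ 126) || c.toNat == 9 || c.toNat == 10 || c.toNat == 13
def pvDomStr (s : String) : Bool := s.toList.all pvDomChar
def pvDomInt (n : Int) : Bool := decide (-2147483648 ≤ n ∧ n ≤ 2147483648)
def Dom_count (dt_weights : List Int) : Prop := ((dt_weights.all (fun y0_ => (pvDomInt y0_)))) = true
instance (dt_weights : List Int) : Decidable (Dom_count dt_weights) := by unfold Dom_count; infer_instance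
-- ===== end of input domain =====

-- B run-length-encodes first and then folds over the runs; A does one pass with a flush at each run end. Same values, different decomposition.

-- ===== PORT A =====
-- one loop step of A: state (lista, contador, n), element i
def countStep (st : List (List (Int × Int)) × Int × Int) (i : Int) :
    List (List (Int × Int)) × Int × Int :=
  if i = 1 then (st.1, st.2.1 + 1, st.2.2 + 1)
  else if st.2.1 ≠ 0 then (st.1 ++ [[(st.2.2, st.2.1)]], 0, st.2.2)
  else (st.1, 0, st.2.2)

def count (dt_weights : List Int) : List (List (Int × Int)) :=
  let st := dt_weights.foldl countStep ([], 0, 0)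
  if st.2.1 ≠ 0 then st.1 ++ [[(st.2.2, st.2.1)]] else st.1

-- ===== PORT B =====
-- _runs loop: accumulator `out`, current run (k, c)
def runsLoop (out : List (Int × Int)) (k c : Int) : List Int → List (Int × Int)
  | [] => out ++ [(k, c)]
  | x :: xs => if x = k then runsLoop out k (c + 1) xs else runsLoop (out ++ [(k, c)]) x 1 xs

def runs : List Int → List (Int × Int)
  | [] => []
  | x :: xs => runsLoop [] x 1 xs

-- the body of B's loop over the runs: state (n, lista)
def groupStep (acc : Int × List (List (Int × Int))) (r : Int × Int) :
    Int × List (List (Int × Int)) :=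
  if r.1 = 1 then (acc.1 + r.2, acc.2 ++ [[(acc.1 + r.2, r.2)]]) else acc

def count_alt (dt_weights : List Int) : List (List (Int × Int)) :=
  ((runs dt_weights).foldl groupStep (0, [])).2

-- ===== PRECONDITION & SPEC =====
def Spec_count (dt_weights : List Int) (out : List (List (Int × Int))) : Prop := out = count_alt dt_weights
instance (dt_weights : List Int) (out : List (List (Int × Int))) : Decidable (Spec_count dt_weights out) := by unfold Spec_count; infer_instance

-- ===== CLAIM (what is proved, stated in full; the proofs are below) =====
def Claim_equal_count : Prop := ∀ (dt_weights : List Int), Dom_count dt_weights → Spec_count dt_weights (count dt_weights)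

-- ===== LEMMAS AND PROOFS =====

-- A's remaining computation from an arbitrary state
def Afin (st : List (List (Int × Int)) × Int × Int) (xs : List Int) : List (List (Int × Int)) :=
  let s := xs.foldl countStep st
  if s.2.1 ≠ 0 then s.1 ++ [[(s.2.2, s.2.1)]] else s.1

-- pure (non-accumulator) version of runsLoop, used only in the proofs
def runsAux (k c : Int) : List Int → List (Int × Int)
  | [] => [(k, c)]
  | x :: xs => if x = k then runsAux k (c + 1) xs else (k, c) :: runsAux x 1 xs

theorem runsLoop_eq (xs : List Int) : ∀ (out : List (Int × Int)) (k c : Int),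
    runsLoop out k c xs = out ++ runsAux k c xs := by
  induction xs with
  | nil => intro out k c; simp [runsLoop, runsAux]
  | cons x xs ih =>
    intro out k c
    by_cases h : x = k <;> simp [runsLoop, runsAux, h, ih]

theorem Afin_cons (st : List (List (Int × Int)) × Int × Int) (x : Int) (xs : List Int) :
    Afin st (x :: xs) = Afin (countStep st x) xs := rfl

-- the central invariant: A's remaining computation matches B's fold over the remaining runs,
-- both mid-run-of-ones (first part) and mid-run of a non-one key (second part)
theorem key (xs : List Int) :
    (∀ (l : List (List (Int × Int))) (c n : Int), 0 < c →
        Afin (l, c, n) xs = ((runsAux 1 c xs).foldl groupStep (n - c, l)).2)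
    ∧ (∀ (k : Int) (l : List (List (Int × Int))) (c n : Int), k ≠ 1 →
        Afin (l, 0, n) xs = ((runsAux k c xs).foldl groupStep (n, l)).2) := by
  induction xs with
  | nil =>
    constructor
    · intro l c n hc
      have h1 : c ≠ 0 := by omega
      have h2 : n - c + c = n := by ring
      simp [Afin, runsAux, groupStep, h1, h2]
    · intro k l c n hk
      simp [Afin, runsAux, groupStep, hk]
  | cons x xs ih =>
    obtain ⟨ih1, ih2⟩ := ih
    constructor
    · intro l c n hc
      rw [Afin_cons]
      by_cases hx : x = 1
      · subst hx
        have : countStep (l, c, n) 1 = (l, c + 1, n + 1) := by simp [countStep]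
        rw [this]
        have h2 : n + 1 - (c + 1) = n - c := by ring
        rw [ih1 l (c + 1) (n + 1) (by omega), h2]
        simp [runsAux]
      · have hc0 : c ≠ 0 := by omega
        have : countStep (l, c, n) x = (l ++ [[(n, c)]], 0, n) := by
          simp [countStep, hx, hc0]
        rw [this, ih2 x (l ++ [[(n, c)]]) 1 n hx]
        have h2 : n - c + c = n := by ring
        simp [runsAux, hx, groupStep, h2]
    · intro k l c n hk
      rw [Afin_cons]
      by_cases hx : x = 1
      · subst hx
        have : countStep (l, 0, n) 1 = (l, 1, n + 1) := by simp [countStep]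
        rw [this, ih1 l 1 (n + 1) (by omega)]
        have hxk : (1 : Int) ≠ k := fun h => hk h.symm
        have h2 : n + 1 - 1 = n := by ring
        simp [runsAux, hxk, groupStep, hk, h2]
      · have : countStep (l, 0, n) x = (l, 0, n) := by simp [countStep, hx]
        rw [this]
        by_cases hxk : x = k
        · subst hxk
          rw [ih2 x l (c + 1) n hx]
          simp [runsAux]
        · rw [ih2 x l 1 n hx]
          simp [runsAux, hxk, groupStep, hk]

theorem count_eq_alt (xs : List Int) : count xs = count_alt xs := by
  cases xs with
  | nil => rfl
  | cons x rest =>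
    by_cases hx : x = 1
    · subst hx
      have hA : count (1 :: rest) = Afin ([], 1, 1) rest := by
        simp [count, Afin, List.foldl, countStep]
      rw [hA, (key rest).1 [] 1 1 (by omega)]
      simp [count_alt, runs, runsLoop_eq]
    · have hA : count (x :: rest) = Afin ([], 0, 0) rest := by
        simp [count, Afin, List.foldl, countStep, hx]
      rw [hA, (key rest).2 x [] 1 0 hx]
      simp [count_alt, runs, runsLoop_eq]

-- ===== VERDICT (by name: the statement is the Claim_ definition above) =====
theorem count_spec : Claim_equal_count := by
  intro xs _
  unfold Spec_count
  exact count_eq_alt xs
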